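-- pv_equiv track=rewrite | github.com/MarwanElkhallouki/BAP | work/python/evaluation/metrics.py | classify_alarms
-- ===== SOURCE A (Python) =====
-- def _match_alarms_to_onsets(
--     alarm_indices: list[int],
--     drift_onsets: list[int],
--     tolerance: int,
-- ) -> list[int | None]:
--     """Match each alarm to at most one drift onset (and vice versa)."""
--     claimed = set()
--     matched_onsets: list[int | None] = []
--     for idx in alarm_indices:
--         matched_onset: int | None = None
--         for onset in drift_onsets:
--             if onset not in claimed and onset <= idx < onset + tolerance:
--                 claimed.add(onset)
--                 matched_onset = onset
--                 break
--         matched_onsets.append(matched_onset)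
--     return matched_onsets
--
-- def classify_alarms(
--     alarm_indices: list[int],
--     drift_onsets: list[int],
--     tolerance: int,
-- ) -> list[bool]:
--     """Label each alarm as TP (True Positive) or FP.
--
--     An alarm is a TP if it falls within [onset, onset + tolerance) for any
--     known drift onset. Each onset can be claimed by at most one alarm.
--     """
--     return [matched is not None for matched in _match_alarms_to_onsets(
--         alarm_indices, drift_onsets, tolerance
--     )]
-- ===== SOURCE B (Python) =====
-- def _upper(vals, x, lo, hi):
--     """First index in sorted vals[lo:hi] range whose value exceeds x (= bisect_right)."""
--     if lo >= hi:
--         return lo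
--     mid = (lo + hi) // 2
--     if vals[mid] <= x:
--         return _upper(vals, x, mid + 1, hi)
--     return _upper(vals, x, lo, mid)
--
--
-- def _build(ps):
--     """Segment tree over the list of (position, rank) pairs; caches min-by-position."""
--     n = len(ps)
--     if n == 1:
--         return ('leaf', ps[0][0], ps[0][1])
--     half = n // 2
--     l = _build(ps[:half])
--     r = _build(ps[half:])
--     mp, mr = (l[1], l[2]) if l[1] <= r[1] else (r[1], r[2])
--     return ('node', mp, mr, l, r)
--
--
-- def _query(t, n, qlo, qhi, inf):
--     """Min (position, rank) over ranks [qlo, qhi) of a tree covering [0, n)."""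
--     if qhi <= 0 or n <= qlo:
--         return (inf, -1)
--     if qlo <= 0 and n <= qhi:
--         return (t[1], t[2])
--     half = n // 2
--     a = _query(t[3], half, qlo, qhi, inf)
--     b = _query(t[4], n - half, qlo - half, qhi - half, inf)
--     return a if a[0] <= b[0] else b
--
--
-- def _remove(t, n, r, inf):
--     """Mark rank r claimed: set its position to inf, recompute cached minima."""
--     if t[0] == 'leaf':
--         return ('leaf', inf, t[2])
--     half = n // 2
--     if r < half:
--         l, rt = _remove(t[3], half, r, inf), t[4]
--     else:
--         l, rt = t[3], _remove(t[4], n - half, r - half, inf)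
--     mp, mr = (l[1], l[2]) if l[1] <= rt[1] else (rt[1], rt[2])
--     return ('node', mp, mr, l, rt)
--
--
-- def classify_alarms(alarm_indices, drift_onsets, tolerance):
--     """Label alarms TP/FP by one-to-one onset matching, via a segment tree.
--
--     A's greedy claims, per alarm, the first still-unclaimed onset (in list
--     order) with onset <= idx < onset + tolerance.  Equivalently: the
--     unclaimed distinct onset of minimal first-occurrence position among
--     those in the value window (idx - tolerance, idx].  B coordinate-
--     compresses the distinct onset values (sorted), finds the window as a
--     contiguous rank range by binary search, and keeps a segment tree over
--     ranks storing the min unclaimed first-occurrence position: one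
--     range-min query plus one removal per alarm, O((A + D) log D) overall.
--     """
--     first_pos = {}
--     for o in drift_onsets:
--         if o not in first_pos:
--             first_pos[o] = len(first_pos)
--     vals = sorted(first_pos)
--     m = len(vals)
--     if m == 0:
--         return [False for _ in alarm_indices]
--     inf = m
--     tree = _build([(first_pos[v], r) for r, v in enumerate(vals)])
--     labels = []
--     for idx in alarm_indices:
--         qlo = _upper(vals, idx - tolerance, 0, m)
--         qhi = _upper(vals, idx, 0, m)
--         best = _query(tree, m, qlo, qhi, inf)
--         if best[0] < inf:
--             labels.append(True)
--             tree = _remove(tree, m, best[1], inf)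
--         else:
--             labels.append(False)
--     return labels
-- ===== Notes on version B (the rewrite author's own statement) =====
-- stated objective: faster
-- what changed: B replaces A's per-alarm linear rescan of the whole onset list (with a claimed set) by coordinate compression: it sorts the distinct onsets once, finds each alarm's value window (idx - tolerance, idx] as a contiguous rank range by binary search, and keeps a segment tree over ranks storing the minimal unclaimed first-occurrence position, answering each alarm with one range-min query and one point removal.
import Mathlib
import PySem

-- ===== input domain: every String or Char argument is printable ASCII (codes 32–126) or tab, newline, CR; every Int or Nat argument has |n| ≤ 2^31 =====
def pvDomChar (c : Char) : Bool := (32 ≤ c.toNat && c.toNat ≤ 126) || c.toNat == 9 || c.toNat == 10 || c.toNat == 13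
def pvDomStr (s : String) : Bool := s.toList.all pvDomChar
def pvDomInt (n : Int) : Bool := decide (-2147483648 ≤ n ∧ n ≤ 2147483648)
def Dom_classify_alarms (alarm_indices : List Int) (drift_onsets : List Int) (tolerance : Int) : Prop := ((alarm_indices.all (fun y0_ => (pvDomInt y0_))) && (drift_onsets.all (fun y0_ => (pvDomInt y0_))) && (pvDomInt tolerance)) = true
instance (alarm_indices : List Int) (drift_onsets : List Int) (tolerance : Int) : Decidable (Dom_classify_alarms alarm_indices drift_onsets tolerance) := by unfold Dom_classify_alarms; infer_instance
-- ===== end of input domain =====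

-- B replaces A's per-alarm linear rescan of all onsets by coordinate compression
-- (sorted distinct onsets), binary-searched value windows and a segment tree holding
-- the min unclaimed first-occurrence position per rank: O((A+D) log D) vs A's O(A·D).

-- ===== PORT A =====
-- inner 'for onset in drift_onsets: … break' loop of _match_alarms_to_onsets
def pvInnerA (claimed : PySem.Set Int) (idx : Int) (tolerance : Int) :
    List Int → PySem.Set Int × Option Int
  | [] => (claimed, none)
  | onset :: rest =>
    if onset ∉ claimed ∧ onset ≤ idx ∧ idx < onset + tolerance then
      (PySem.Set.add claimed onset, some onset)
    else pvInnerA claimed idx tolerance rest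

def pvMatchAlarmsToOnsets (alarm_indices : List Int) (drift_onsets : List Int)
    (tolerance : Int) : List (Option Int) :=
  (alarm_indices.foldl
    (fun (st : PySem.Set Int × List (Option Int)) idx =>
      let r := pvInnerA st.1 idx tolerance drift_onsets
      (r.1, st.2 ++ [r.2]))
    ((PySem.Set.empty : PySem.Set Int), ([] : List (Option Int)))).2

def classify_alarms (alarm_indices : List Int) (drift_onsets : List Int) (tolerance : Int) : List Bool :=
  (pvMatchAlarmsToOnsets alarm_indices drift_onsets tolerance).map (·.isSome)

-- ===== PORT B =====
-- Source B's segment-tree node: ('leaf', pos, rank) / ('node', minpos, minrank, left, right)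
inductive PvSegT where
  | leaf : Int → Int → PvSegT
  | node : Int → Int → PvSegT → PvSegT → PvSegT
deriving DecidableEq, Repr

-- t[1] / t[2] of Source B: the cached (min position, its rank) of a subtree
def pvMinP : PvSegT → Int
  | .leaf p _ => p
  | .node p _ _ _ => p

def pvMinR : PvSegT → Int
  | .leaf _ r => r
  | .node _ r _ _ => r

-- _upper of Source B (recursive bisect-right; hand-written there since A imports nothing)
def pvUpper (vals : List Int) (x : Int) (lo hi : Int) : Int :=
  if _h : lo ≥ hi then lo
  else
    -- vals[mid]: in range whenever 0 ≤ lo < hi ≤ len(vals), as at every call site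
    if (PySem.List.pyGet? vals (PySem.Int.floordiv (lo + hi) 2)).getD 0 ≤ x then
      pvUpper vals x (PySem.Int.floordiv (lo + hi) 2 + 1) hi
    else
      pvUpper vals x lo (PySem.Int.floordiv (lo + hi) 2)
termination_by (hi - lo).toNat
decreasing_by
  · have hm1 := (PySem.Int.floordiv_two_mid_bounds (lo := lo) (hi := hi) (by omega)).1
    have hm2 := (PySem.Int.floordiv_lt_iff_lt_mul (a := lo + hi) (b := 2) (q := hi) (by norm_num)).mpr (by omega)
    omega
  · have hm2 := (PySem.Int.floordiv_lt_iff_lt_mul (a := lo + hi) (b := 2) (q := hi) (by norm_num)).mpr (by omega)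
    omega

-- _build of Source B (the [] case is unreachable: Python raises IndexError there)
def pvBuild : List (Int × Int) → PvSegT
  | [] => PvSegT.leaf 0 (-1)
  | [pr] => PvSegT.leaf pr.1 pr.2
  | pr1 :: pr2 :: rest =>
    let ps := pr1 :: pr2 :: rest
    let half := ps.length / 2
    let l := pvBuild (ps.take half)
    let r := pvBuild (ps.drop half)
    if pvMinP l ≤ pvMinP r then PvSegT.node (pvMinP l) (pvMinR l) l r
    else PvSegT.node (pvMinP r) (pvMinR r) l r
termination_by ps => ps.length
decreasing_by
  · simp [List.length_take]; omega
  · simp [List.length_drop]; omega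

-- _query of Source B (partial cover of a leaf is unreachable: Python raises t[3] IndexError)
def pvQuery (t : PvSegT) (n qlo qhi inf : Int) : Int × Int :=
  match t with
  | .leaf p r =>
    if qhi ≤ 0 ∨ n ≤ qlo then (inf, -1)
    else if qlo ≤ 0 ∧ n ≤ qhi then (p, r)
    else (inf, -1)
  | .node mp mr l r =>
    if qhi ≤ 0 ∨ n ≤ qlo then (inf, -1)
    else if qlo ≤ 0 ∧ n ≤ qhi then (mp, mr)
    else
      let half := PySem.Int.floordiv n 2
      let a := pvQuery l half qlo qhi inf
      let b := pvQuery r (n - half) (qlo - half) (qhi - half) inf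
      if a.1 ≤ b.1 then a else b

-- _remove of Source B
def pvRemove (t : PvSegT) (n r inf : Int) : PvSegT :=
  match t with
  | .leaf _ rk => PvSegT.leaf inf rk
  | .node _ _ l rt =>
    let half := PySem.Int.floordiv n 2
    if r < half then
      let l' := pvRemove l half r inf
      if pvMinP l' ≤ pvMinP rt then PvSegT.node (pvMinP l') (pvMinR l') l' rt
      else PvSegT.node (pvMinP rt) (pvMinR rt) l' rt
    else
      let rt' := pvRemove rt (n - half) (r - half) inf
      if pvMinP l ≤ pvMinP rt' then PvSegT.node (pvMinP l) (pvMinR l) l rt'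
      else PvSegT.node (pvMinP rt') (pvMinR rt') l rt'

-- body of Source B's 'for idx in alarm_indices' loop (n = inf = m)
def pvStep (vals : List Int) (n inf tolerance : Int) (st : PvSegT × List Bool) (idx : Int) :
    PvSegT × List Bool :=
  let qlo := pvUpper vals (idx - tolerance) 0 n
  let qhi := pvUpper vals idx 0 n
  let best := pvQuery st.1 n qlo qhi inf
  if best.1 < inf then (pvRemove st.1 n best.2 inf, st.2 ++ [true])
  else (st.1, st.2 ++ [false])

def classify_alarms_alt (alarm_indices : List Int) (drift_onsets : List Int) (tolerance : Int) : List Bool :=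
  let first_pos := drift_onsets.foldl
    (fun (d : PySem.Dict Int Int) o =>
      if d.contains o then d else d.insert o (d.size : Int))
    (PySem.Dict.empty : PySem.Dict Int Int)
  let vals := PySem.List.sorted (PySem.Dict.keys first_pos) (fun v => v)
  let m := vals.length
  if m = 0 then alarm_indices.map (fun _ => false)
  else
    let tree := pvBuild ((PySem.List.enumerate vals).map (fun rv => (first_pos.getD rv.2 0, rv.1)))
    (alarm_indices.foldl (pvStep vals (m : Int) (m : Int) tolerance) (tree, ([] : List Bool))).2

-- ===== PRECONDITION & SPEC =====
def Spec_classify_alarms (alarm_indices : List Int) (drift_onsets : List Int) (tolerance : Int) (out : List Bool) : Prop := out = classify_alarms_alt alarm_indices drift_onsets tolerance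
instance (alarm_indices : List Int) (drift_onsets : List Int) (tolerance : Int) (out : List Bool) : Decidable (Spec_classify_alarms alarm_indices drift_onsets tolerance out) := by unfold Spec_classify_alarms; infer_instance

-- ===== CLAIM (what is proved, stated in full; the proofs are below) =====
def Claim_equal_classify_alarms : Prop := ∀ (alarm_indices : List Int) (drift_onsets : List Int) (tolerance : Int), Dom_classify_alarms alarm_indices drift_onsets tolerance → Spec_classify_alarms alarm_indices drift_onsets tolerance (classify_alarms alarm_indices drift_onsets tolerance)

-- ===== LEMMAS AND PROOFS =====

-- ---------- A-side characterisation ----------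

-- A's matched list, by structural recursion (= the foldl with the accumulator peeled off)
def pvRecA (tolerance : Int) (drift_onsets : List Int) (claimed : PySem.Set Int) :
    List Int → List (Option Int)
  | [] => []
  | idx :: rest =>
    (pvInnerA claimed idx tolerance drift_onsets).2 ::
      pvRecA tolerance drift_onsets (pvInnerA claimed idx tolerance drift_onsets).1 rest

theorem pvFoldA_eq_recA (tolerance : Int) (drift_onsets : List Int) :
    ∀ (alarms : List Int) (claimed : PySem.Set Int) (acc : List (Option Int)),
      (alarms.foldl
        (fun (st : PySem.Set Int × List (Option Int)) idx =>
          let r := pvInnerA st.1 idx tolerance drift_onsets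
          (r.1, st.2 ++ [r.2])) (claimed, acc)).2
      = acc ++ pvRecA tolerance drift_onsets claimed alarms
  | [], claimed, acc => by simp [pvRecA]
  | idx :: rest, claimed, acc => by
    simp only [List.foldl_cons, pvRecA]
    rw [pvFoldA_eq_recA tolerance drift_onsets rest]
    simp

-- the inner scan-with-break is find? over drift_onsets
theorem pvInnerA_eq_find (claimed : PySem.Set Int) (idx tolerance : Int) :
    ∀ onsets : List Int,
      pvInnerA claimed idx tolerance onsets =
        match onsets.find? (fun o => decide (o ∉ claimed ∧ o ≤ idx ∧ idx < o + tolerance)) with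
        | none => (claimed, none)
        | some v => (PySem.Set.add claimed v, some v)
  | [] => by simp [pvInnerA]
  | onset :: rest => by
    by_cases h : onset ∉ claimed ∧ onset ≤ idx ∧ idx < onset + tolerance
    · simp [pvInnerA, h, List.find?]
    · simp only [pvInnerA, if_neg h]
      rw [List.find?_cons_of_neg (by simpa using h)]
      exact pvInnerA_eq_find claimed idx tolerance rest

-- Set.add only appends: the accumulator is a prefix of the fold
theorem pvPrefix_foldl_add :
    ∀ (xs s : List Int), s <+: xs.foldl PySem.Set.add s
  | [], s => List.prefix_refl s
  | x :: xs, s => by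
    have h1 : s <+: PySem.Set.add s x := by
      unfold PySem.Set.add
      split
      · exact List.prefix_refl s
      · exact ⟨[x], rfl⟩
    exact h1.trans (pvPrefix_foldl_add xs (PySem.Set.add s x))

-- find? is blind to deduplication by Set.add folding (value predicates only)
theorem pvFind?_foldl_add (p : Int → Bool) :
    ∀ (xs s : List Int), List.find? p s = none →
      List.find? p (xs.foldl PySem.Set.add s) = List.find? p xs
  | [], s, hs => by simpa using hs
  | x :: xs, s, hs => by
    by_cases hx : p x
    · have hxs : x ∉ s := by
        intro hmem
        have := List.find?_eq_none.mp hs x hmem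
        simp [hx] at this
      have hadd : PySem.Set.add s x = s ++ [x] := PySem.Set.add_of_not_mem hxs
      simp only [List.foldl_cons, hadd]
      obtain ⟨r, hr⟩ := pvPrefix_foldl_add xs (s ++ [x])
      rw [← hr, List.append_assoc, List.find?_append, hs]
      simp [List.find?, hx]
    · have hadd : List.find? p (PySem.Set.add s x) = none := by
        unfold PySem.Set.add
        split
        · exact hs
        · rw [List.find?_append, hs]
          simp [List.find?, hx]
      simp only [List.foldl_cons]
      rw [List.find?_cons_of_neg (by simpa using hx)]
      exact pvFind?_foldl_add p xs (PySem.Set.add s x) hadd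

theorem pvFind?_dedup (p : Int → Bool) (xs : List Int) :
    List.find? p (PySem.List.dedup xs) = List.find? p xs :=
  pvFind?_foldl_add p xs [] rfl

-- find? returns the match of MINIMAL index
theorem pvFind?_min_idxOf (p : Int → Bool) :
    ∀ (l : List Int) (v : Int), l.find? p = some v →
      ∀ w ∈ l, p w → l.idxOf v ≤ l.idxOf w
  | [], v, h => by simp at h
  | x :: xs, v, h => by
    intro w hw hpw
    by_cases hx : p x
    · rw [List.find?_cons_of_pos hx] at h
      injection h with h
      subst h
      simp [List.idxOf_cons_self]
    · rw [List.find?_cons_of_neg hx] at h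
      have hvx : v ≠ x := by
        intro he
        subst he
        exact hx (List.find?_some h)
      have hwx : w ≠ x := by
        intro he
        subst he
        exact hx hpw
      have hwmem : w ∈ xs := by
        rcases List.mem_cons.mp hw with hw' | hw'
        · exact absurd hw' hwx
        · exact hw'
      rw [List.idxOf_cons_ne xs (Ne.symm hvx), List.idxOf_cons_ne xs (Ne.symm hwx)]
      have := pvFind?_min_idxOf p xs v h w hwmem hpw
      omega

-- ---------- B-side: segment-tree model ----------

-- the tree models the list of (position, rank) pairs at its leaves, split at half,
-- with the cached pair the left-biased min-by-position
def pvMods : PvSegT → List (Int × Int) → Prop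
  | .leaf p r, ps => ps = [(p, r)]
  | .node mp mr l r, ps =>
    2 ≤ ps.length ∧ pvMods l (ps.take (ps.length / 2)) ∧ pvMods r (ps.drop (ps.length / 2)) ∧
    ((mp, mr) = if pvMinP l ≤ pvMinP r then (pvMinP l, pvMinR l) else (pvMinP r, pvMinR r))

theorem pvBuild_models : ∀ ps : List (Int × Int), ps ≠ [] → pvMods (pvBuild ps) ps
  | [], h => absurd rfl h
  | [pr], _ => by simp [pvBuild, pvMods]
  | pr1 :: pr2 :: rest, _ => by
    have hlen : 2 ≤ (pr1 :: pr2 :: rest).length := by simp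
    have hhalf1 : 1 ≤ (pr1 :: pr2 :: rest).length / 2 := by omega
    have hhalf2 : (pr1 :: pr2 :: rest).length / 2 < (pr1 :: pr2 :: rest).length := by omega
    have htake : (pr1 :: pr2 :: rest).take ((pr1 :: pr2 :: rest).length / 2) ≠ [] := by
      simp [List.take_eq_nil_iff]
    have hdrop : (pr1 :: pr2 :: rest).drop ((pr1 :: pr2 :: rest).length / 2) ≠ [] := by
      simp [List.drop_eq_nil_iff]
      omega
    have ihl := pvBuild_models ((pr1 :: pr2 :: rest).take ((pr1 :: pr2 :: rest).length / 2)) htake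
    have ihr := pvBuild_models ((pr1 :: pr2 :: rest).drop ((pr1 :: pr2 :: rest).length / 2)) hdrop
    rw [pvBuild]
    split
    · exact ⟨hlen, ihl, ihr, by simp_all⟩
    · exact ⟨hlen, ihl, ihr, by simp_all⟩
termination_by ps => ps.length
decreasing_by
  · simp [List.length_take]; omega
  · simp [List.length_drop]; omega

theorem pvMods_minPair_mem : ∀ {t : PvSegT} {ps : List (Int × Int)}, pvMods t ps →
    (pvMinP t, pvMinR t) ∈ ps
  | .leaf p r, ps, h => by
    simp only [pvMods] at h
    simp [h, pvMinP, pvMinR]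
  | .node mp mr l r, ps, h => by
    obtain ⟨h2, hl, hr, hc⟩ := h
    have hml := pvMods_minPair_mem hl
    have hmr := pvMods_minPair_mem hr
    show (mp, mr) ∈ ps
    rw [hc]
    split
    · exact List.mem_of_mem_take hml
    · exact List.mem_of_mem_drop hmr

theorem pvMods_minPair_le : ∀ {t : PvSegT} {ps : List (Int × Int)}, pvMods t ps →
    ∀ q ∈ ps, pvMinP t ≤ q.1
  | .leaf p r, ps, h => by
    simp only [pvMods] at h
    simp [h, pvMinP]
  | .node mp mr l r, ps, h => by
    obtain ⟨h2, hl, hr, hc⟩ := h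
    intro q hq
    have hsplit : q ∈ ps.take (ps.length / 2) ∨ q ∈ ps.drop (ps.length / 2) := by
      rw [← List.mem_append, List.take_append_drop]; exact hq
    have hminP : pvMinP (PvSegT.node mp mr l r) = mp := rfl
    rw [hminP]
    have hmpv : mp = if pvMinP l ≤ pvMinP r then pvMinP l else pvMinP r := by
      rcases hc' : (if pvMinP l ≤ pvMinP r then (pvMinP l, pvMinR l) else (pvMinP r, pvMinR r)) with ⟨a, b⟩
      rw [hc' ] at hc
      split at hc' <;> split <;> simp_all
    rcases hsplit with hq' | hq'
    · have := pvMods_minPair_le hl q hq'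
      rw [hmpv]; split <;> omega
    · have := pvMods_minPair_le hr q hq'
      rw [hmpv]; split <;> omega

theorem pvQuery_spec : ∀ {t : PvSegT} {ps : List (Int × Int)}, pvMods t ps →
    ∀ (qlo qhi inf : Int),
    (∀ (k : Nat) (_hk : k < ps.length), qlo ≤ (k : Int) → (k : Int) < qhi →
      (pvQuery t (ps.length : Int) qlo qhi inf).1 ≤ (ps[k]).1)
    ∧ ((pvQuery t (ps.length : Int) qlo qhi inf).1 < inf →
      ∃ (k : Nat) (_hk : k < ps.length), qlo ≤ (k : Int) ∧ (k : Int) < qhi ∧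
        pvQuery t (ps.length : Int) qlo qhi inf = ps[k])
  | .leaf p r, ps, h, qlo, qhi, inf => by
    simp only [pvMods] at h
    subst h
    by_cases c1 : qhi ≤ 0 ∨ ((1:Nat) : Int) ≤ qlo
    · constructor
      · intro k hk hlo hhi
        simp only [List.length_cons, List.length_nil] at hk
        rcases c1 with c1 | c1 <;> [omega; (exfalso; simp at c1; omega)]
      · intro hlt
        exfalso
        have : (pvQuery (PvSegT.leaf p r) (([(p, r)].length : Nat) : Int) qlo qhi inf).1 = inf := by
          simp only [pvQuery, List.length_cons, List.length_nil]
          rw [if_pos (by simpa using c1)]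
        omega
    · have c2 : qlo ≤ 0 ∧ (([(p, r)].length : Nat) : Int) ≤ qhi := by
        simp only [List.length_cons, List.length_nil]
        push_cast
        simp at c1
        omega
      have hres : pvQuery (PvSegT.leaf p r) (([(p, r)].length : Nat) : Int) qlo qhi inf = (p, r) := by
        simp only [pvQuery, List.length_cons, List.length_nil]
        rw [if_neg (by simpa using c1), if_pos (by simpa using c2)]
      norm_num at hres c2
      constructor
      · intro k hk hlo hhi
        simp only [List.length_cons, List.length_nil] at hk
        have : k = 0 := by omega
        subst this
        simp [hres]
      · intro _
        exact ⟨0, by simp, by omega, by simpa using c2.2, by simpa using hres⟩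
  | .node mp mr l rt, ps, h, qlo, qhi, inf => by
    obtain ⟨h2, hl, hr, hc⟩ := h
    have hLlen : (ps.take (ps.length / 2)).length = ps.length / 2 := by
      simp [List.length_take]; omega
    have hRlen : (ps.drop (ps.length / 2)).length = ps.length - ps.length / 2 := by
      simp [List.length_drop]
    by_cases c1 : qhi ≤ 0 ∨ ((ps.length : Nat) : Int) ≤ qlo
    · constructor
      · intro k hk hlo hhi
        exfalso
        rcases c1 with c1 | c1 <;> omega
      · intro hlt
        exfalso
        have : (pvQuery (PvSegT.node mp mr l rt) ((ps.length : Nat) : Int) qlo qhi inf).1 = inf := by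
          simp only [pvQuery]
          rw [if_pos c1]
        omega
    · by_cases c2 : qlo ≤ 0 ∧ ((ps.length : Nat) : Int) ≤ qhi
      · have hmods : pvMods (PvSegT.node mp mr l rt) ps := ⟨h2, hl, hr, hc⟩
        have hres : pvQuery (PvSegT.node mp mr l rt) ((ps.length : Nat) : Int) qlo qhi inf = (mp, mr) := by
          simp only [pvQuery]
          rw [if_neg c1, if_pos c2]
        constructor
        · intro k hk hlo hhi
          rw [hres]
          exact pvMods_minPair_le hmods ps[k] (List.getElem_mem hk)
        · intro _
          have hmem : ((mp, mr) : Int × Int) ∈ ps := pvMods_minPair_mem hmods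
          obtain ⟨k, hk, hkeq⟩ := List.mem_iff_getElem.mp hmem
          exact ⟨k, hk, by omega, by omega, by rw [hres, hkeq]⟩
      · -- split branch
        have hcast : PySem.Int.floordiv ((ps.length : Nat) : Int) 2 = ((ps.length / 2 : Nat) : Int) := by
          exact_mod_cast PySem.Int.floordiv_natCast ps.length 2
        have hres : pvQuery (PvSegT.node mp mr l rt) ((ps.length : Nat) : Int) qlo qhi inf =
            (if (pvQuery l ((ps.length / 2 : Nat) : Int) qlo qhi inf).1 ≤
                (pvQuery rt (((ps.length : Nat) : Int) - ((ps.length / 2 : Nat) : Int))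
                  (qlo - ((ps.length / 2 : Nat) : Int)) (qhi - ((ps.length / 2 : Nat) : Int)) inf).1
             then pvQuery l ((ps.length / 2 : Nat) : Int) qlo qhi inf
             else pvQuery rt (((ps.length : Nat) : Int) - ((ps.length / 2 : Nat) : Int))
                  (qlo - ((ps.length / 2 : Nat) : Int)) (qhi - ((ps.length / 2 : Nat) : Int)) inf) := by
          simp only [pvQuery]
          rw [if_neg c1, if_neg c2]
          simp only [hcast]
        have ihl := pvQuery_spec hl qlo qhi inf
        have ihr := pvQuery_spec hr (qlo - ((ps.length / 2 : Nat) : Int))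
          (qhi - ((ps.length / 2 : Nat) : Int)) inf
        simp only [hLlen] at ihl
        simp only [hRlen] at ihr
        have hRcast : (((ps.length - ps.length / 2 : Nat)) : Int) =
            ((ps.length : Nat) : Int) - ((ps.length / 2 : Nat) : Int) := by
          push_cast [Nat.cast_sub (Nat.div_le_self _ _)]
          ring
        simp only [hRcast] at ihr
        set a := pvQuery l ((ps.length / 2 : Nat) : Int) qlo qhi inf with ha
        set b := pvQuery rt (((ps.length : Nat) : Int) - ((ps.length / 2 : Nat) : Int))
          (qlo - ((ps.length / 2 : Nat) : Int)) (qhi - ((ps.length / 2 : Nat) : Int)) inf with hb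
        constructor
        · intro k hk hlo hhi
          rw [hres]
          by_cases hkh : k < ps.length / 2
          · have h1 : a.1 ≤ (ps[k]).1 := by
              have := ihl.1 k (by omega) hlo hhi
              rwa [List.getElem_take] at this
            split <;> omega
          · have hk' : k - ps.length / 2 < ps.length - ps.length / 2 := by omega
            have h1 : b.1 ≤ (ps[k]).1 := by
              have := ihr.1 (k - ps.length / 2) hk' (by push_cast [Nat.cast_sub (by omega : ps.length / 2 ≤ k)]; omega)
                (by push_cast [Nat.cast_sub (by omega : ps.length / 2 ≤ k)]; omega)
              rw [List.getElem_drop] at this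
              simpa only [show ps.length / 2 + (k - ps.length / 2) = k from by omega] using this
            split <;> omega
        · intro hlt
          rw [hres] at hlt ⊢
          by_cases hab : a.1 ≤ b.1
          · rw [if_pos hab] at hlt ⊢
            obtain ⟨k, hk, h1, h2', h3⟩ := ihl.2 hlt
            refine ⟨k, by omega, h1, h2', ?_⟩
            rw [h3, List.getElem_take]
          · rw [if_neg hab] at hlt ⊢
            obtain ⟨k, hk, h1, h2', h3⟩ := ihr.2 hlt
            refine ⟨ps.length / 2 + k, by omega, by push_cast; omega, by push_cast; omega, ?_⟩
            rw [h3, List.getElem_drop]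

theorem pvRemove_spec : ∀ {t : PvSegT} {ps : List (Int × Int)}, pvMods t ps →
    ∀ (r : Nat) (hr : r < ps.length) (inf : Int),
    pvMods (pvRemove t (ps.length : Int) (r : Int) inf) (ps.set r (inf, (ps[r]).2))
  | .leaf p rk, ps, h, r, hr, inf => by
    simp only [pvMods] at h
    subst h
    have : r = 0 := by simp at hr; omega
    subst this
    simp [pvRemove, pvMods]
  | .node mp mr l rt, ps, h, r, hr, inf => by
    obtain ⟨h2, hl, hr', hc⟩ := h
    have hLlen : (ps.take (ps.length / 2)).length = ps.length / 2 := by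
      simp [List.length_take]; omega
    have hRlen : (ps.drop (ps.length / 2)).length = ps.length - ps.length / 2 := by
      simp [List.length_drop]
    have hcast : PySem.Int.floordiv ((ps.length : Nat) : Int) 2 = ((ps.length / 2 : Nat) : Int) := by
      exact_mod_cast PySem.Int.floordiv_natCast ps.length 2
    have hlen2 : 2 ≤ (ps.set r (inf, (ps[r]).2)).length := by rw [List.length_set]; omega
    have hlenseq : (ps.set r (inf, (ps[r]).2)).length = ps.length := List.length_set
    by_cases hrh : r < ps.length / 2
    · have ihl := pvRemove_spec hl r (by rw [hLlen]; omega) inf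
      simp only [hLlen, List.getElem_take] at ihl
      have hres : pvRemove (PvSegT.node mp mr l rt) ((ps.length : Nat) : Int) ((r : Nat) : Int) inf =
          (if pvMinP (pvRemove l ((ps.length / 2 : Nat) : Int) ((r : Nat) : Int) inf) ≤ pvMinP rt then
            PvSegT.node (pvMinP (pvRemove l ((ps.length / 2 : Nat) : Int) ((r : Nat) : Int) inf))
              (pvMinR (pvRemove l ((ps.length / 2 : Nat) : Int) ((r : Nat) : Int) inf))
              (pvRemove l ((ps.length / 2 : Nat) : Int) ((r : Nat) : Int) inf) rt
          else PvSegT.node (pvMinP rt) (pvMinR rt)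
              (pvRemove l ((ps.length / 2 : Nat) : Int) ((r : Nat) : Int) inf) rt) := by
        simp only [pvRemove, hcast]
        rw [if_pos (by exact_mod_cast Nat.cast_lt.mpr hrh)]
      rw [hres]
      have htake : (ps.set r (inf, (ps[r]).2)).take (ps.length / 2)
          = (ps.take (ps.length / 2)).set r (inf, (ps[r]).2) := List.take_set
      have hdrop : (ps.set r (inf, (ps[r]).2)).drop (ps.length / 2) = ps.drop (ps.length / 2) := by
        rw [List.drop_set, if_pos hrh]
      split
      · exact ⟨hlen2, by rw [hlenseq, htake]; exact ihl, by rw [hlenseq, hdrop]; exact hr',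
          by simp_all⟩
      · exact ⟨hlen2, by rw [hlenseq, htake]; exact ihl, by rw [hlenseq, hdrop]; exact hr',
          by simp_all⟩
    · have hr2 : r - ps.length / 2 < (ps.drop (ps.length / 2)).length := by rw [hRlen]; omega
      have ihr := pvRemove_spec hr' (r - ps.length / 2) hr2 inf
      simp only [hRlen, List.getElem_drop,
        show ps.length / 2 + (r - ps.length / 2) = r from by omega] at ihr
      have hcast2 : ((r : Nat) : Int) - ((ps.length / 2 : Nat) : Int) = (((r - ps.length / 2 : Nat)) : Int) := by
        push_cast [Nat.cast_sub (by omega : ps.length / 2 ≤ r)]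
        ring
      have hcast3 : ((ps.length : Nat) : Int) - ((ps.length / 2 : Nat) : Int)
          = (((ps.length - ps.length / 2 : Nat)) : Int) := by
        push_cast [Nat.cast_sub (Nat.div_le_self _ _)]
        ring
      have hres : pvRemove (PvSegT.node mp mr l rt) ((ps.length : Nat) : Int) ((r : Nat) : Int) inf =
          (if pvMinP l ≤ pvMinP (pvRemove rt (((ps.length - ps.length / 2 : Nat)) : Int)
                (((r - ps.length / 2 : Nat)) : Int) inf) then
            PvSegT.node (pvMinP l) (pvMinR l) l
              (pvRemove rt (((ps.length - ps.length / 2 : Nat)) : Int)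
                (((r - ps.length / 2 : Nat)) : Int) inf)
          else PvSegT.node
              (pvMinP (pvRemove rt (((ps.length - ps.length / 2 : Nat)) : Int)
                (((r - ps.length / 2 : Nat)) : Int) inf))
              (pvMinR (pvRemove rt (((ps.length - ps.length / 2 : Nat)) : Int)
                (((r - ps.length / 2 : Nat)) : Int) inf))
              l
              (pvRemove rt (((ps.length - ps.length / 2 : Nat)) : Int)
                (((r - ps.length / 2 : Nat)) : Int) inf)) := by
        simp only [pvRemove, hcast]
        rw [if_neg (by push_cast; omega), hcast2, hcast3]
      rw [hres]
      have htake : (ps.set r (inf, (ps[r]).2)).take (ps.length / 2) = ps.take (ps.length / 2) := by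
        rw [List.take_set, List.set_eq_of_length_le (by rw [hLlen]; omega)]
      have hdrop : (ps.set r (inf, (ps[r]).2)).drop (ps.length / 2)
          = (ps.drop (ps.length / 2)).set (r - ps.length / 2) (inf, (ps[r]).2) := by
        rw [List.drop_set, if_neg (by omega)]
      split
      · exact ⟨hlen2, by rw [hlenseq, htake]; exact hl, by rw [hlenseq, hdrop]; exact ihr,
          by simp_all⟩
      · exact ⟨hlen2, by rw [hlenseq, htake]; exact hl, by rw [hlenseq, hdrop]; exact ihr,
          by simp_all⟩

-- ---------- B-side: binary search ----------

theorem pvUpper_spec (vals : List Int) (x : Int)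
    (hs : ∀ (i j : Nat) (_ : i < vals.length) (_ : j < vals.length), i < j → vals[i] ≤ vals[j]) :
    ∀ (fuel : Nat) (lo hi : Int), (hi - lo).toNat ≤ fuel → 0 ≤ lo → lo ≤ hi → hi ≤ (vals.length : Int) →
      (∀ (j : Nat) (hj : j < vals.length), (j : Int) < lo → vals[j] ≤ x) →
      (∀ (j : Nat) (hj : j < vals.length), hi ≤ (j : Int) → x < vals[j]) →
      ∃ u : Nat, pvUpper vals x lo hi = (u : Int) ∧ u ≤ vals.length ∧
        (∀ (j : Nat) (hj : j < vals.length), (j < u ↔ vals[j] ≤ x)) := by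
  intro fuel
  induction fuel with
  | zero =>
    intro lo hi hf h0 hlh hhi hb ha
    have heq : lo = hi := by omega
    rw [pvUpper, dif_pos (by omega)]
    refine ⟨lo.toNat, by omega, by omega, ?_⟩
    intro j hj
    constructor
    · intro hju
      exact hb j hj (by omega)
    · intro hle
      by_contra hc
      exact absurd (ha j hj (by omega)) (by omega)
  | succ fuel ih =>
    intro lo hi hf h0 hlh hhi hb ha
    by_cases hd : lo ≥ hi
    · rw [pvUpper, dif_pos hd]
      refine ⟨lo.toNat, by omega, by omega, ?_⟩
      intro j hj
      constructor
      · intro hju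
        exact hb j hj (by omega)
      · intro hle
        by_contra hc
        exact absurd (ha j hj (by omega)) (by omega)
    · rw [pvUpper, dif_neg hd]
      have hmid := PySem.Int.floordiv_two_mid_bounds (lo := lo) (hi := hi) (by omega)
      have hmlt := (PySem.Int.floordiv_lt_iff_lt_mul (a := lo + hi) (b := 2) (q := hi) (by norm_num)).mpr (by omega)
      set mid := PySem.Int.floordiv (lo + hi) 2 with hmiddef
      have hmnat : mid = ((mid.toNat : Nat) : Int) := by omega
      have hmltlen : mid.toNat < vals.length := by omega
      have hget : (PySem.List.pyGet? vals mid).getD 0 = vals[mid.toNat] := by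
        conv_lhs => rw [hmnat]
        rw [PySem.List.pyGet?_natCast, List.getElem?_eq_getElem hmltlen]
        rfl
      rw [hget]
      by_cases hcmp : vals[mid.toNat] ≤ x
      · rw [if_pos hcmp]
        apply ih (mid + 1) hi (by omega) (by omega) (by omega) hhi
        · intro j hj hjlt
          by_cases hjm : j < mid.toNat
          · exact le_trans (hs j mid.toNat hj hmltlen hjm) hcmp
          · have : j = mid.toNat := by omega
            subst this
            exact hcmp
        · exact ha
      · rw [if_neg hcmp]
        apply ih lo mid (by omega) h0 (by omega) (by omega) hb
        intro j hj hjge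
        have h1 : x < vals[mid.toNat] := by omega
        rcases Nat.lt_or_ge mid.toNat j with h | h
        · calc x < vals[mid.toNat] := h1
            _ ≤ vals[j] := hs mid.toNat j hmltlen hj h
        · have : j = mid.toNat := by omega
          subst this
          exact h1

-- ---------- dict of first positions ----------

def pvPairsOf (S : List Int) : List (Int × Int) :=
  (PySem.List.enumerate S).map (fun p => (p.2, p.1))

theorem pvMapFst_pairsOf (S : List Int) : (pvPairsOf S).map (·.1) = S := by
  have := PySem.List.map_snd_enumerate S 0
  simp only [pvPairsOf, List.map_map]
  exact this

theorem pvPairsOf_append (S : List Int) (o : Int) :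
    pvPairsOf (S ++ [o]) = pvPairsOf S ++ [(o, (S.length : Int))] := by
  simp [pvPairsOf, PySem.List.enumerate_append, PySem.List.enumerate_cons,
    PySem.List.enumerate_nil]

theorem pvFirstPos_aux : ∀ (ds S : List Int),
    (ds.foldl
      (fun (d : PySem.Dict Int Int) o =>
        if d.contains o then d else d.insert o (d.size : Int))
      (PySem.Dict.mk (pvPairsOf S))).items
    = pvPairsOf (ds.foldl PySem.Set.add S)
  | [], S => rfl
  | o :: ds, S => by
    simp only [List.foldl_cons]
    have hcont : (PySem.Dict.mk (pvPairsOf S)).contains o = decide (o ∈ S) := by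
      rw [PySem.Dict.contains_eq_decide_mem_keys]
      congr 1
      simp only [PySem.Dict.keys]
      rw [pvMapFst_pairsOf]
    by_cases hmem : o ∈ S
    · rw [hcont]
      simp only [hmem, decide_true, if_true]
      rw [PySem.Set.add_of_mem hmem]
      exact pvFirstPos_aux ds S
    · rw [hcont]
      simp only [hmem, decide_false]
      rw [if_neg (by simp)]
      have hsize : (PySem.Dict.mk (pvPairsOf S)).size = S.length := by
        show (pvPairsOf S).length = S.length
        simp [pvPairsOf, PySem.List.length_enumerate]
      have hins : (PySem.Dict.mk (pvPairsOf S)).insert o ((PySem.Dict.mk (pvPairsOf S)).size : Int)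
          = PySem.Dict.mk (pvPairsOf (S ++ [o])) := by
        apply PySem.Dict.ext
        rw [PySem.Dict.items_insert_of_not_contains _ _ (by simp [hcont, hmem])]
        rw [show (PySem.Dict.mk (pvPairsOf S)).items = pvPairsOf S from rfl]
        rw [pvPairsOf_append, hsize]
      rw [hins, PySem.Set.add_of_not_mem hmem]
      exact pvFirstPos_aux ds (S ++ [o])

theorem pvFirstPos_items (ds : List Int) :
    (ds.foldl
      (fun (d : PySem.Dict Int Int) o =>
        if d.contains o then d else d.insert o (d.size : Int))
      (PySem.Dict.empty : PySem.Dict Int Int)).items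
    = pvPairsOf (PySem.List.dedup ds) := by
  have h := pvFirstPos_aux ds []
  have h0 : (PySem.Dict.empty : PySem.Dict Int Int) = PySem.Dict.mk (pvPairsOf []) := rfl
  rw [h0]
  exact h

-- ---------- main invariant ----------

-- B's loop by structural recursion
def pvRecB (vals : List Int) (n inf tolerance : Int) : List Int → PvSegT → List Bool
  | [], _ => []
  | idx :: rest, t =>
    let qlo := pvUpper vals (idx - tolerance) 0 n
    let qhi := pvUpper vals idx 0 n
    let best := pvQuery t n qlo qhi inf
    if best.1 < inf then true :: pvRecB vals n inf tolerance rest (pvRemove t n best.2 inf)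
    else false :: pvRecB vals n inf tolerance rest t

theorem pvFoldB_eq_recB (vals : List Int) (n inf tolerance : Int) :
    ∀ (alarms : List Int) (t : PvSegT) (acc : List Bool),
      (alarms.foldl (pvStep vals n inf tolerance) (t, acc)).2
        = acc ++ pvRecB vals n inf tolerance alarms t
  | [], t, acc => by simp [pvRecB]
  | idx :: rest, t, acc => by
    simp only [List.foldl_cons, pvRecB, pvStep]
    by_cases hb : (pvQuery t n (pvUpper vals (idx - tolerance) 0 n) (pvUpper vals idx 0 n) inf).1 < inf
    · simp only [if_pos hb]
      rw [pvFoldB_eq_recB vals n inf tolerance rest]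
      simp
    · simp only [if_neg hb]
      rw [pvFoldB_eq_recB vals n inf tolerance rest]
      simp

-- the modelled pair list for a given claimed set
def pvPS (vals D : List Int) (claimed : List Int) : List (Int × Int) :=
  (PySem.List.enumerate vals).map
    (fun rv => ((if rv.2 ∈ claimed then (D.length : Int) else (D.idxOf rv.2 : Int)), rv.1))

theorem pvMainAux (ds : List Int) (tolerance : Int) (D vals : List Int)
    (hD : D = PySem.List.dedup ds)
    (hperm : vals.Perm D)
    (hmono : ∀ (i j : Nat) (_hi : i < vals.length) (_hj : j < vals.length), i < j → vals[i] ≤ vals[j])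
    (hnd : vals.Nodup) :
    ∀ (alarms claimed : List Int) (t : PvSegT),
      pvMods t (pvPS vals D claimed) →
      (pvRecA tolerance ds claimed alarms).map Option.isSome
        = pvRecB vals (vals.length : Int) (vals.length : Int) tolerance alarms t
  | [], claimed, t, hmods => by simp [pvRecA, pvRecB]
  | idx :: rest, claimed, t, hmods => by
    have hlen : vals.length = D.length := hperm.length_eq
    have hpslen : ∀ (c : List Int), (pvPS vals D c).length = vals.length := by
      intro c
      simp [pvPS, PySem.List.length_enumerate]
    have hpsget : ∀ (c : List Int) (r : Nat) (hr : r < vals.length),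
        (pvPS vals D c)[r]'(by rw [hpslen]; exact hr) =
          ((if vals[r] ∈ c then ((D.length : Nat) : Int) else ((D.idxOf vals[r] : Nat) : Int)),
            (r : Int)) := by
      intro c r hr
      simp [pvPS, PySem.List.getElem_enumerate]
    -- the two binary searches delimit the value window as a rank interval
    obtain ⟨ulo, hulo_eq, hulo_le, hulo⟩ :=
      pvUpper_spec vals (idx - tolerance) hmono vals.length 0 (vals.length : Int)
        (by omega) (by omega) (by omega) (by omega)
        (fun j hj hc => absurd hc (by omega))
        (fun j hj hge => absurd hge (by omega))
    obtain ⟨uhi, huhi_eq, huhi_le, huhi⟩ :=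
      pvUpper_spec vals idx hmono vals.length 0 (vals.length : Int)
        (by omega) (by omega) (by omega) (by omega)
        (fun j hj hc => absurd hc (by omega))
        (fun j hj hge => absurd hge (by omega))
    have hwin : ∀ (k : Nat) (hk : k < vals.length),
        (pvUpper vals (idx - tolerance) 0 (vals.length : Int) ≤ (k : Int) ∧
          (k : Int) < pvUpper vals idx 0 (vals.length : Int))
        ↔ (idx - tolerance < vals[k] ∧ vals[k] ≤ idx) := by
      intro k hk
      rw [hulo_eq, huhi_eq]
      constructor
      · rintro ⟨h1, h2⟩
        refine ⟨?_, (huhi k hk).mp (by omega)⟩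
        by_contra hc
        have := (hulo k hk).mpr (by omega)
        omega
      · rintro ⟨h1, h2⟩
        refine ⟨?_, by exact_mod_cast Nat.cast_lt.mpr ((huhi k hk).mpr h2)⟩
        by_contra hc
        have : k < ulo := by omega
        have := (hulo k hk).mp this
        omega
    have hQ := pvQuery_spec hmods (pvUpper vals (idx - tolerance) 0 (vals.length : Int))
      (pvUpper vals idx 0 (vals.length : Int)) ((vals.length : Nat) : Int)
    simp only [hpslen] at hQ
    -- A's inner loop over all onsets = find? over the deduplicated onsets
    have hA : pvInnerA claimed idx tolerance ds =
        match D.find? (fun o => decide (o ∉ claimed ∧ o ≤ idx ∧ idx < o + tolerance)) with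
        | none => (claimed, none)
        | some v => (PySem.Set.add claimed v, some v) := by
      rw [pvInnerA_eq_find]
      rw [← pvFind?_dedup (fun o => decide (o ∉ claimed ∧ o ≤ idx ∧ idx < o + tolerance)) ds, ← hD]
    -- the matched-onset existence agrees on both sides
    have hiff : (pvQuery t ((vals.length : Nat) : Int)
          (pvUpper vals (idx - tolerance) 0 (vals.length : Int))
          (pvUpper vals idx 0 (vals.length : Int)) ((vals.length : Nat) : Int)).1
          < ((vals.length : Nat) : Int)
        ↔ ∃ o ∈ D, (decide (o ∉ claimed ∧ o ≤ idx ∧ idx < o + tolerance)) = true := by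
      constructor
      · intro hlt
        obtain ⟨k, hk, h1, h2, h3⟩ := hQ.2 hlt
        have hu : vals[k] ∉ claimed := by
          intro hmem
          have := hpsget claimed k hk
          rw [this] at h3
          rw [if_pos hmem] at h3
          rw [h3] at hlt
          simp at hlt
          omega
        have hw := (hwin k hk).mp ⟨h1, h2⟩
        exact ⟨vals[k], hperm.mem_iff.mp (List.getElem_mem hk),
          by simp only [decide_eq_true_eq]; exact ⟨hu, by omega, by omega⟩⟩
      · rintro ⟨o, ho, hpo⟩
        simp only [decide_eq_true_eq] at hpo
        obtain ⟨k, hk, hkeq⟩ := List.mem_iff_getElem.mp (hperm.mem_iff.mpr ho)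
        subst hkeq
        have hw := (hwin k hk).mpr ⟨by omega, by omega⟩
        have h1 := hQ.1 k hk hw.1 hw.2
        rw [hpsget claimed k hk, if_neg hpo.1] at h1
        have hidx : D.idxOf vals[k] < D.length :=
          List.idxOf_lt_length_of_mem (hperm.mem_iff.mp (List.getElem_mem hk))
        omega
    cases hfind : D.find? (fun o => decide (o ∉ claimed ∧ o ≤ idx ∧ idx < o + tolerance)) with
    | none =>
      have hnone : ¬ ∃ o ∈ D, (decide (o ∉ claimed ∧ o ≤ idx ∧ idx < o + tolerance)) = true := by
        rintro ⟨o, ho, hpo⟩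
        exact absurd hpo (by simpa using List.find?_eq_none.mp hfind o ho)
      simp only [pvRecA, pvRecB, List.map_cons]
      rw [hA, hfind]
      rw [if_neg (by intro hc; exact hnone (hiff.mp hc))]
      simp only [Option.isSome_none]
      congr 1
      exact pvMainAux ds tolerance D vals hD hperm hmono hnd rest claimed t hmods
    | some v =>
      have hv_mem : v ∈ D := List.mem_of_find?_eq_some hfind
      have hv_p := List.find?_some hfind
      simp only [decide_eq_true_eq] at hv_p
      have hlt : (pvQuery t ((vals.length : Nat) : Int)
          (pvUpper vals (idx - tolerance) 0 (vals.length : Int))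
          (pvUpper vals idx 0 (vals.length : Int)) ((vals.length : Nat) : Int)).1
          < ((vals.length : Nat) : Int) := by
        apply hiff.mpr
        exact ⟨v, hv_mem, by simp only [decide_eq_true_eq]; exact hv_p⟩
      obtain ⟨k, hk, h1, h2, h3⟩ := hQ.2 hlt
      have hu : vals[k] ∉ claimed := by
        intro hmem
        have := hpsget claimed k hk
        rw [this, if_pos hmem] at h3
        rw [h3] at hlt
        simp at hlt
        omega
      have hw := (hwin k hk).mp ⟨h1, h2⟩
      have hkD : vals[k] ∈ D := hperm.mem_iff.mp (List.getElem_mem hk)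
      have hpk : (decide (vals[k] ∉ claimed ∧ vals[k] ≤ idx ∧ idx < vals[k] + tolerance)) = true := by
        simp only [decide_eq_true_eq]
        exact ⟨hu, by omega, by omega⟩
      -- v has minimal dedup index among matches; vals[k] has minimal stored index; equal
      have hmin := pvFind?_min_idxOf _ D v hfind vals[k] hkD hpk
      have hveq : vals[k] = v := by
        obtain ⟨kv, hkv, hkveq⟩ := List.mem_iff_getElem.mp (hperm.mem_iff.mpr hv_mem)
        have hwv := (hwin kv hkv).mpr (by rw [hkveq]; omega)
        have hql := hQ.1 kv hkv hwv.1 hwv.2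
        have huv : vals[kv] ∉ claimed := by rw [hkveq]; exact hv_p.1
        rw [hpsget claimed kv hkv, if_neg huv, hkveq] at hql
        rw [hpsget claimed k hk, if_neg hu] at h3
        have hq1 : (pvQuery t ((vals.length : Nat) : Int)
            (pvUpper vals (idx - tolerance) 0 (vals.length : Int))
            (pvUpper vals idx 0 (vals.length : Int)) ((vals.length : Nat) : Int)).1
            = ((D.idxOf vals[k] : Nat) : Int) := by rw [h3]
        rw [hq1] at hql
        have hideq : D.idxOf vals[k] = D.idxOf v := by omega
        have e1 := List.getElem_idxOf (x := vals[k]) (xs := D) (List.idxOf_lt_length_of_mem hkD)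
        have e2 := List.getElem_idxOf (x := v) (xs := D) (List.idxOf_lt_length_of_mem hv_mem)
        rw [← e1, ← e2]
        congr 1
      -- B takes the same branch, removes rank k, and the models stay in sync
      have hb2 : (pvQuery t ((vals.length : Nat) : Int)
          (pvUpper vals (idx - tolerance) 0 (vals.length : Int))
          (pvUpper vals idx 0 (vals.length : Int)) ((vals.length : Nat) : Int)).2 = (k : Int) := by
        rw [h3, hpsget claimed k hk]
      have hstate : (pvPS vals D claimed).set k (((vals.length : Nat) : Int), (k : Int))
          = pvPS vals D (PySem.Set.add claimed v) := by
        apply List.ext_getElem (by rw [List.length_set, hpslen, hpslen])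
        intro r hr1 hr2
        have hr : r < vals.length := by rw [hpslen] at hr2; exact hr2
        rw [List.getElem_set]
        rw [hpsget (PySem.Set.add claimed v) r hr]
        by_cases hkr : k = r
        · subst hkr
          rw [if_pos rfl]
          have : vals[k] ∈ PySem.Set.add claimed v := by
            rw [PySem.Set.mem_add]
            exact Or.inr hveq
          rw [if_pos this]
          simp [hlen]
        · rw [if_neg hkr]
          have hne : vals[r] ≠ v := by
            rw [← hveq]
            intro hc
            exact hkr ((List.Nodup.getElem_inj_iff hnd).mp hc.symm)
          have : (vals[r] ∈ PySem.Set.add claimed v) ↔ vals[r] ∈ claimed := by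
            rw [PySem.Set.mem_add]
            simp [hne]
          rw [hpsget claimed r hr]
          simp only [this]
      have hmods' : pvMods (pvRemove t ((vals.length : Nat) : Int)
            (pvQuery t ((vals.length : Nat) : Int)
              (pvUpper vals (idx - tolerance) 0 (vals.length : Int))
              (pvUpper vals idx 0 (vals.length : Int)) ((vals.length : Nat) : Int)).2
            ((vals.length : Nat) : Int))
          (pvPS vals D (PySem.Set.add claimed v)) := by
        rw [hb2, ← hstate]
        have hsp := pvRemove_spec hmods k (by rw [hpslen]; exact hk) ((vals.length : Nat) : Int)
        simp only [hpslen] at hsp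
        have hsnd : ((pvPS vals D claimed)[k]'(by rw [hpslen]; exact hk)).2 = (k : Int) := by
          rw [hpsget claimed k hk]
        rw [hsnd] at hsp
        exact hsp
      simp only [pvRecA, pvRecB, List.map_cons]
      rw [hA, hfind]
      rw [if_pos hlt]
      simp only [Option.isSome_some]
      congr 1
      exact pvMainAux ds tolerance D vals hD hperm hmono hnd rest
        (PySem.Set.add claimed v) _ hmods'

theorem pvRecA_nil (tolerance : Int) :
    ∀ (alarms : List Int) (claimed : PySem.Set Int),
      (pvRecA tolerance [] claimed alarms).map Option.isSome = alarms.map (fun _ => false)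
  | [], _ => rfl
  | idx :: rest, claimed => by
    simp only [pvRecA, pvInnerA, List.map_cons]
    rw [pvRecA_nil tolerance rest claimed]
    rfl

-- ===== VERDICT (by name: the statement is the Claim_ definition above) =====
theorem classify_alarms_spec : Claim_equal_classify_alarms := by
  intro alarm_indices drift_onsets tolerance _
  unfold Spec_classify_alarms classify_alarms pvMatchAlarmsToOnsets
  rw [pvFoldA_eq_recA, List.nil_append]
  simp only [classify_alarms_alt]
  have hitems := pvFirstPos_items drift_onsets
  have hkeys : (drift_onsets.foldl
      (fun (d : PySem.Dict Int Int) o =>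
        if d.contains o then d else d.insert o (d.size : Int))
      (PySem.Dict.empty : PySem.Dict Int Int)).keys = PySem.List.dedup drift_onsets := by
    simp only [PySem.Dict.keys]
    rw [hitems, pvMapFst_pairsOf]
  rw [hkeys]
  by_cases hm : (PySem.List.sorted (PySem.List.dedup drift_onsets) (fun v => v)).length = 0
  · rw [if_pos hm]
    have hdnil : PySem.List.dedup drift_onsets = [] := by
      have := PySem.List.length_sorted (PySem.List.dedup drift_onsets) (fun v => v) false
      have hlen0 : (PySem.List.dedup drift_onsets).length = 0 := by omega
      exact List.length_eq_zero_iff.mp hlen0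
    have hds : drift_onsets = [] := by
      apply List.eq_nil_iff_forall_not_mem.mpr
      intro x hx
      have : x ∈ PySem.List.dedup drift_onsets := (PySem.List.mem_dedup _ _).mpr hx
      rw [hdnil] at this
      exact absurd this (List.not_mem_nil)
    rw [hds]
    exact pvRecA_nil tolerance alarm_indices PySem.Set.empty
  · rw [if_neg hm]
    rw [pvFoldB_eq_recB, List.nil_append]
    have hperm : (PySem.List.sorted (PySem.List.dedup drift_onsets) (fun v => v)).Perm
        (PySem.List.dedup drift_onsets) := PySem.List.sorted_perm _ _ _
    have hplt : (PySem.List.sorted (PySem.List.dedup drift_onsets) (fun v => v)).Pairwise (· < ·) := by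
      have := PySem.List.sorted_ofList_pairwise_lt (xs := drift_onsets)
      simpa [PySem.List.dedup_eq_ofList] using this
    have hmono : ∀ (i j : Nat)
        (_hi : i < (PySem.List.sorted (PySem.List.dedup drift_onsets) (fun v => v)).length)
        (_hj : j < (PySem.List.sorted (PySem.List.dedup drift_onsets) (fun v => v)).length),
        i < j → (PySem.List.sorted (PySem.List.dedup drift_onsets) (fun v => v))[i]
          ≤ (PySem.List.sorted (PySem.List.dedup drift_onsets) (fun v => v))[j] := by
      intro i j hi hj hij
      exact le_of_lt (List.pairwise_iff_getElem.mp hplt i j hi hj hij)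
    have hnd : (PySem.List.sorted (PySem.List.dedup drift_onsets) (fun v => v)).Nodup :=
      hplt.imp ne_of_lt
    have hkeysnd : (drift_onsets.foldl
        (fun (d : PySem.Dict Int Int) o =>
          if d.contains o then d else d.insert o (d.size : Int))
        (PySem.Dict.empty : PySem.Dict Int Int)).keys.Nodup := by
      rw [hkeys]
      exact PySem.List.nodup_dedup _
    have hgetD : ∀ v ∈ PySem.List.dedup drift_onsets,
        (drift_onsets.foldl
          (fun (d : PySem.Dict Int Int) o =>
            if d.contains o then d else d.insert o (d.size : Int))
          (PySem.Dict.empty : PySem.Dict Int Int)).getD v 0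
        = (((PySem.List.dedup drift_onsets).idxOf v : Nat) : Int) := by
      intro v hv
      have hj : (PySem.List.dedup drift_onsets).idxOf v < (PySem.List.dedup drift_onsets).length :=
        List.idxOf_lt_length_of_mem hv
      apply PySem.Dict.getD_of_mem_items _ _ hkeysnd
      rw [hitems]
      apply List.mem_map.mpr
      refine ⟨((((PySem.List.dedup drift_onsets).idxOf v : Nat) : Int),
        (PySem.List.dedup drift_onsets)[(PySem.List.dedup drift_onsets).idxOf v]), ?_, ?_⟩
      · apply (PySem.List.mem_enumerate_iff _ _ _).mpr
        exact ⟨(PySem.List.dedup drift_onsets).idxOf v, hj, by rw [zero_add]⟩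
      · rw [List.getElem_idxOf]
    have hps0 : (PySem.List.enumerate (PySem.List.sorted (PySem.List.dedup drift_onsets) (fun v => v))).map
        (fun rv => ((drift_onsets.foldl
          (fun (d : PySem.Dict Int Int) o =>
            if d.contains o then d else d.insert o (d.size : Int))
          (PySem.Dict.empty : PySem.Dict Int Int)).getD rv.2 0, rv.1))
        = pvPS (PySem.List.sorted (PySem.List.dedup drift_onsets) (fun v => v))
            (PySem.List.dedup drift_onsets) PySem.Set.empty := by
      apply List.ext_getElem
      · simp [pvPS, PySem.List.length_enumerate]
      · intro r hr1 hr2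
        have hr : r < (PySem.List.sorted (PySem.List.dedup drift_onsets) (fun v => v)).length := by
          simpa [PySem.List.length_enumerate] using hr1
        simp only [List.getElem_map, PySem.List.getElem_enumerate, pvPS]
        have hmemD : (PySem.List.sorted (PySem.List.dedup drift_onsets) (fun v => v))[r]
            ∈ PySem.List.dedup drift_onsets := hperm.mem_iff.mp (List.getElem_mem hr)
        rw [hgetD _ hmemD]
        have : ¬ ((PySem.List.sorted (PySem.List.dedup drift_onsets) (fun v => v))[r]
            ∈ (PySem.Set.empty : PySem.Set Int)) := by
          rw [PySem.Set.empty_eq]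
          exact List.not_mem_nil
        rw [if_neg this]
    rw [hps0]
    have hne : pvPS (PySem.List.sorted (PySem.List.dedup drift_onsets) (fun v => v))
        (PySem.List.dedup drift_onsets) PySem.Set.empty ≠ [] := by
      intro hc
      have := congrArg List.length hc
      simp only [pvPS, List.length_map, PySem.List.length_enumerate, List.length_nil] at this
      exact hm this
    exact pvMainAux drift_onsets tolerance (PySem.List.dedup drift_onsets)
      (PySem.List.sorted (PySem.List.dedup drift_onsets) (fun v => v)) rfl hperm hmono hnd
      alarm_indices PySem.Set.empty _ (pvBuild_models _ hne)
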